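-- pv_equiv track=rewrite | github.com/cabcode-id/TALAS | Production/machine-learning/testing/test.py | grouparticlesByTitleIndex
-- ===== SOURCE A (Python) =====
-- def grouparticlesByTitleIndex(articles):
--     grouped = {}
--     for article in articles:
--         index = article['title_index']
--         if index not in grouped:
--             grouped[index] = []
--         grouped[index].append(article)
--     return grouped
-- ===== SOURCE B (Python) =====
-- def grouparticlesByTitleIndex(articles):
--     keys = list(dict.fromkeys(a['title_index'] for a in articles))
--     return {k: [a for a in articles if a['title_index'] == k] for k in keys}
-- ===== Notes on version B (the rewrite author's own statement) =====
-- stated objective: alternative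
-- what changed: Replaces the single hash-accumulation pass (create-empty-then-append per article) with a two-phase decomposition: first collect the distinct keys in first-occurrence order via dict.fromkeys, then build each group in one comprehension by filtering the article list per key.
import Mathlib
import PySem

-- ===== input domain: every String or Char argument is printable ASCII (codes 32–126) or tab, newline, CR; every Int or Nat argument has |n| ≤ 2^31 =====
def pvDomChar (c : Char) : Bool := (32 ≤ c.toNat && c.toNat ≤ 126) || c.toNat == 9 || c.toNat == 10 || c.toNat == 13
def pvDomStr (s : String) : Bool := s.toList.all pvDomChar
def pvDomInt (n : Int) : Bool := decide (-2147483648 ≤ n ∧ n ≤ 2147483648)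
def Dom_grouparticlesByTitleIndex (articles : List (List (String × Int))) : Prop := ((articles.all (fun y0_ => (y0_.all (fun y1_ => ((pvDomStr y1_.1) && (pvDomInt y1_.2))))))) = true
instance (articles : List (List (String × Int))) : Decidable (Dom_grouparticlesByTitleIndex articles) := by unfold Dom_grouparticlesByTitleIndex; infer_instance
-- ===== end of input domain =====

-- B replaces A's single hash-accumulation pass with a two-phase decomposition (dedup the keys
-- in first-occurrence order, then build each group by filtering the article list per key);
-- an alternative algorithm of similar cost, proved to return the same dict.


-- article['title_index'] : first-match lookup in the article's association list (both Pythons do it);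
-- the default 0 is never reached on Pre_ (every article has the key).
def pyTitleIndex (a : List (String × Int)) : Int :=
  (PySem.Dict.mk a).getD "title_index" 0

-- ===== PORT A =====
-- one pass: grouped = {}; for article: if index not in grouped: grouped[index] = []; grouped[index].append(article)
def grouparticlesByTitleIndex (articles : List (List (String × Int))) : List (Int × List (List (String × Int))) :=
  (articles.foldl
    (fun (grouped : PySem.Dict Int (List (List (String × Int)))) article =>
      let index := pyTitleIndex article
      let grouped' := if grouped.contains index then grouped else grouped.insert index []
      grouped'.modify index [] (fun l => l ++ [article]))
    PySem.Dict.empty).items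

-- ===== PORT B =====
-- keys = list(dict.fromkeys(idx per article)); {k: [a for a in articles if idx a == k] for k in keys}
def grouparticlesByTitleIndex_alt (articles : List (List (String × Int))) : List (Int × List (List (String × Int))) :=
  (PySem.List.dedup (articles.map pyTitleIndex)).map
    (fun k => (k, articles.filter (fun a => pyTitleIndex a == k)))

-- ===== PRECONDITION & SPEC =====
-- Pre_ excludes exactly the inputs on which A raises KeyError: an article without a 'title_index' key.
def Pre_grouparticlesByTitleIndex (articles : List (List (String × Int))) : Prop :=
  ∀ a ∈ articles, "title_index" ∈ a.map Prod.fst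
instance (articles : List (List (String × Int))) : Decidable (Pre_grouparticlesByTitleIndex articles) := by unfold Pre_grouparticlesByTitleIndex; infer_instance

def pvWitness_grouparticlesByTitleIndex : (List (List (String × Int))) :=
  [[("title_index", 1), ("id", 7)], [("title_index", 2)], [("title_index", 1)]]

def Spec_grouparticlesByTitleIndex (articles : List (List (String × Int))) (out : List (Int × List (List (String × Int)))) : Prop := out = grouparticlesByTitleIndex_alt articles
instance (articles : List (List (String × Int))) (out : List (Int × List (List (String × Int)))) : Decidable (Spec_grouparticlesByTitleIndex articles out) := by unfold Spec_grouparticlesByTitleIndex; infer_instance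

-- ===== CLAIM (what is proved, stated in full; the proofs are below) =====
def Claim_equal_grouparticlesByTitleIndex : Prop := ∀ (articles : List (List (String × Int))), Dom_grouparticlesByTitleIndex articles → Pre_grouparticlesByTitleIndex articles → Spec_grouparticlesByTitleIndex articles (grouparticlesByTitleIndex articles)

-- ===== LEMMAS AND PROOFS =====

-- A's loop body, named for the lemmas below
def stepA (grouped : PySem.Dict Int (List (List (String × Int)))) (article : List (String × Int)) :
    PySem.Dict Int (List (List (String × Int))) :=
  let index := pyTitleIndex article
  let grouped' := if grouped.contains index then grouped else grouped.insert index []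
  grouped'.modify index [] (fun l => l ++ [article])

theorem stepA_getD (g : PySem.Dict Int (List (List (String × Int)))) (a : List (String × Int)) (k : Int) :
    (stepA g a).getD k [] =
      if pyTitleIndex a == k then g.getD k [] ++ [a] else g.getD k [] := by
  unfold stepA
  rw [PySem.Dict.getD_modify]
  by_cases hk : k = pyTitleIndex a
  · subst hk
    simp only [beq_self_eq_true, if_true]
    by_cases hc : g.contains (pyTitleIndex a) = true
    · rw [if_pos hc]
    · rw [if_neg hc, PySem.Dict.getD_insert_self,
        PySem.Dict.getD_of_not_contains g [] (Bool.not_eq_true _ ▸ hc)]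
  · have hb : (pyTitleIndex a == k) = false := beq_eq_false_iff_ne.mpr (fun he => hk he.symm)
    rw [if_neg hk, hb]
    by_cases hc : g.contains (pyTitleIndex a) = true
    · rw [if_pos hc, if_neg (by simp)]
    · rw [if_neg hc, PySem.Dict.getD_insert, if_neg hk, if_neg (by simp)]

theorem stepA_keys (g : PySem.Dict Int (List (List (String × Int)))) (a : List (String × Int)) :
    (stepA g a).keys = PySem.Set.add g.keys (pyTitleIndex a) := by
  unfold stepA PySem.Set.add
  rw [PySem.Dict.keys_modify]
  by_cases hc : g.contains (pyTitleIndex a) = true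
  · rw [if_pos hc, PySem.Dict.keys_insert_of_contains g _ hc, if_pos]
    simp only [PySem.Set.contains, List.contains_eq_mem]
    simp [← PySem.Dict.contains_iff_mem_keys, hc]
  · have hc' := Bool.not_eq_true _ ▸ hc
    rw [if_neg hc, PySem.Dict.keys_insert_of_contains, PySem.Dict.keys_insert_of_not_contains g _ hc']
    · rw [if_neg]
      simp only [PySem.Set.contains, List.contains_eq_mem]
      simp [← PySem.Dict.contains_iff_mem_keys, hc']
    · simp

theorem foldA_getD (l : List (List (String × Int))) (d : PySem.Dict Int (List (List (String × Int)))) (k : Int) :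
    (l.foldl stepA d).getD k [] = d.getD k [] ++ l.filter (fun a => pyTitleIndex a == k) := by
  induction l generalizing d with
  | nil => simp
  | cons a t ih =>
    rw [List.foldl_cons, ih, stepA_getD, List.filter_cons]
    by_cases h : (pyTitleIndex a == k) = true
    · simp [h]
    · simp [h]

theorem foldA_keys (l : List (List (String × Int))) (d : PySem.Dict Int (List (List (String × Int)))) :
    (l.foldl stepA d).keys = List.foldl PySem.Set.add d.keys (l.map pyTitleIndex) := by
  induction l generalizing d with
  | nil => simp
  | cons a t ih => rw [List.foldl_cons, ih, stepA_keys, List.map_cons, List.foldl_cons]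

-- a dict with distinct keys is its key list paired with its lookups
theorem items_eq_map_keys (d : PySem.Dict Int (List (List (String × Int)))) (h : d.keys.Nodup) :
    d.items = d.keys.map (fun k => (k, d.getD k [])) := by
  obtain ⟨l⟩ := d
  induction l with
  | nil => simp [PySem.Dict.keys]
  | cons p t ih =>
    obtain ⟨k0, v0⟩ := p
    simp only [PySem.Dict.keys, List.map_cons, List.nodup_cons] at h
    have hself : (PySem.Dict.mk ((k0, v0) :: t)).getD k0 [] = v0 := by
      simp [PySem.Dict.getD, PySem.Dict.get?]
    have htail : ∀ k ∈ t.map Prod.fst,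
        (PySem.Dict.mk ((k0, v0) :: t)).getD k [] = (PySem.Dict.mk t).getD k [] := by
      intro k hk
      have hne : k ≠ k0 := fun he => h.1 (he ▸ hk)
      simp [PySem.Dict.getD, PySem.Dict.get?, beq_eq_false_iff_ne.mpr (Ne.symm hne)]
    have ih' := ih h.2
    simp only [PySem.Dict.keys] at ih' ⊢
    simp only [List.map_cons]
    congr 1
    · simp [hself]
    · have h2 : ∀ k ∈ List.map (fun x => x.1) t,
          ((k, (PySem.Dict.mk ((k0, v0) :: t)).getD k []) : Int × List (List (String × Int)))
            = (k, (PySem.Dict.mk t).getD k []) := fun k hk => by rw [htail k hk]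
      rw [List.map_congr_left h2, ← ih']

-- ===== VERDICT (by name: the statement is the Claim_ definition above) =====
theorem grouparticlesByTitleIndex_spec : Claim_equal_grouparticlesByTitleIndex := by
  intro articles _ _
  show grouparticlesByTitleIndex articles = grouparticlesByTitleIndex_alt articles
  unfold grouparticlesByTitleIndex grouparticlesByTitleIndex_alt
  have hstep : (fun (grouped : PySem.Dict Int (List (List (String × Int)))) article =>
      let index := pyTitleIndex article
      let grouped' := if grouped.contains index then grouped else grouped.insert index []
      grouped'.modify index [] (fun l => l ++ [article])) = stepA := rfl
  rw [hstep]
  have hkeys : (articles.foldl stepA PySem.Dict.empty).keys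
      = PySem.List.dedup (articles.map pyTitleIndex) := by
    rw [foldA_keys, PySem.List.dedup_eq_ofList]
    rfl
  rw [items_eq_map_keys _ (hkeys ▸ PySem.List.nodup_dedup _), hkeys]
  apply List.map_congr_left
  intro k _
  rw [foldA_getD]
  rfl
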